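-- pv_equiv track=rewrite | github.com/milkbottle0305/coding-test | 백준/Gold/12919. A와 B 2/A와 B 2.py | solution
-- ===== SOURCE A (Python) =====
-- def solution(S, T):
--     if len(S) == len(T):
--         if S == T:
--             yield 1
--         else:
--             yield 0
--     elif len(S) < len(T):
--         if T[len(T) - 1] == "A":
--             T1 = T[0: len(T) - 1]
--             yield from solution(S, T1)
--         if T[0] == "B":
--             T2 = T[1:]
--             T2 = T2[::-1]
--             yield from solution(S, T2)
--         yield 0
--     else:
--         yield 0
-- ===== SOURCE B (Python) =====
-- def solution(S, T):
--     stack = [T]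
--     while stack:
--         t = stack.pop()
--         if t is None:
--             yield 0
--         elif len(S) == len(t):
--             yield 1 if S == t else 0
--         elif len(S) < len(t):
--             items = [None]
--             if t[0] == "B":
--                 items.append(t[1:][::-1])
--             if t[-1] == "A":
--                 items.append(t[:-1])
--             stack.extend(items)
--         else:
--             yield 0
-- ===== Notes on version B (the rewrite author's own statement) =====
-- stated objective: alternative
-- what changed: A's recursive generator is replaced by an iterative loop over an explicit LIFO stack whose entries are either a string still to expand or a None sentinel meaning 'emit 0', pushed so that pops reproduce A's yield order.
import Mathlib
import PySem

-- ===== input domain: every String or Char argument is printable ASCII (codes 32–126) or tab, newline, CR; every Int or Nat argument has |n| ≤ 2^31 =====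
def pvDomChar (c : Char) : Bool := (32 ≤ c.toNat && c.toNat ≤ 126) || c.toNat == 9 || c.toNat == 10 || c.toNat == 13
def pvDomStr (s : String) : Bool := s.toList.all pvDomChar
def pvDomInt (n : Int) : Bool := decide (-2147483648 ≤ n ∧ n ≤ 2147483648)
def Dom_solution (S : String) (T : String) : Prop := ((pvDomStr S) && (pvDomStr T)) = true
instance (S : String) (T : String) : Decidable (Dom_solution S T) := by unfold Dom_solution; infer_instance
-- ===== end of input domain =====

-- B replaces A's recursive generator by an iterative loop over an explicit LIFO stack
-- (sentinel `none` = emit 0); same cost, different decomposition. Equivalence of the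
-- yielded sequences (as lists) is proved for all inputs.

-- ===== PORT A =====
-- A's recursion, on the character lists of S and T.  Slices T[0:len-1], T[1:], T[::-1]
-- are take/drop/reverse (exact for these slice forms); the index tests T[len(T)-1]=="A"
-- and T[0]=="B" are getLast?/head? (exact: in that branch len T > len S ≥ 0, so T ≠ []).
def solGenA (S t : List Char) : List Int :=
  if S.length = t.length then
    [if S = t then (1 : Int) else 0]
  else if _h : S.length < t.length then
    (if t.getLast? = some 'A' then solGenA S (t.take (t.length - 1)) else [])
      ++ (if t.head? = some 'B' then solGenA S ((t.drop 1).reverse) else [])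
      ++ [0]
  else [0]
termination_by t.length
decreasing_by
  all_goals (simp [List.length_take]; omega)

def solution (S : String) (T : String) : List Int := solGenA S.toList T.toList

-- ===== PORT B =====
-- the stack loop of Source B: pop the top entry; `none` (the sentinel) yields 0; otherwise
-- compare lengths, and in the expand case push sentinel, then (if t[0]=='B') reversed
-- t[1:], then (if t[-1]=='A') t[:-1], so they pop in the original order.
def pvWeight (x : Option (List Char)) : Nat :=
  match x with
  | none => 1
  | some t => 2 * 3 ^ t.length

def pvStackM (st : List (Option (List Char))) : Nat := (st.map pvWeight).sum

theorem pvPowSplit (l : Nat) (hl : 1 ≤ l) : 3 ^ l = 3 * 3 ^ (l - 1) := by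
  obtain ⟨m, rfl⟩ : ∃ m, l = m + 1 := ⟨l - 1, by omega⟩
  simp [pow_succ]; ring

def loopB (S : List Char) (st : List (Option (List Char))) : List Int :=
  match st with
  | [] => []
  | none :: rest => 0 :: loopB S rest
  | some t :: rest =>
    if S.length = t.length then
      (if S = t then (1 : Int) else 0) :: loopB S rest
    else if _h : S.length < t.length then
      loopB S ((if t.getLast? = some 'A' then [some (t.take (t.length - 1))] else [])
        ++ (if t.head? = some 'B' then [some ((t.drop 1).reverse)] else [])
        ++ none :: rest)
    else 0 :: loopB S rest
termination_by pvStackM st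
decreasing_by
  · simp [pvStackM, pvWeight]
  · simp [pvStackM, pvWeight]
  · have h3 : 1 ≤ 3 ^ (t.length - 1) := Nat.one_le_pow _ _ (by norm_num)
    have hpow := pvPowSplit t.length (by omega)
    have htake : (t.take (t.length - 1)).length = t.length - 1 := by
      simp [List.length_take]
    simp only [pvStackM, List.map_append, List.sum_append, List.map_cons, List.sum_cons]
    split_ifs <;> simp [pvWeight, htake] <;> omega
  · simp [pvStackM, pvWeight]

def solution_alt (S : String) (T : String) : List Int := loopB S.toList [some T.toList]

-- ===== PRECONDITION & SPEC =====
def Spec_solution (S : String) (T : String) (out : List Int) : Prop := out = solution_alt S T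
instance (S : String) (T : String) (out : List Int) : Decidable (Spec_solution S T out) := by unfold Spec_solution; infer_instance

-- ===== CLAIM (what is proved, stated in full; the proofs are below) =====
def Claim_equal_solution : Prop := ∀ (S : String) (T : String), Dom_solution S T → Spec_solution S T (solution S T)

-- ===== LEMMAS AND PROOFS =====
def pvEmit (S : List Char) (x : Option (List Char)) : List Int :=
  match x with
  | none => [0]
  | some t => solGenA S t

theorem pvWeight_pos (x : Option (List Char)) : 1 ≤ pvWeight x := by
  cases x with
  | none => simp [pvWeight]
  | some t =>
    have : 1 ≤ 3 ^ t.length := Nat.one_le_pow _ _ (by norm_num)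
    simp [pvWeight]; omega

theorem solGenA_eq_len (S t : List Char) (heq : S.length = t.length) :
    solGenA S t = [if S = t then (1 : Int) else 0] := by
  rw [solGenA]; simp [heq]

theorem solGenA_gt (S t : List Char) (heq : ¬ S.length = t.length)
    (hlt : ¬ S.length < t.length) : solGenA S t = [0] := by
  rw [solGenA]; simp [heq, hlt]

theorem solGenA_expand (S t : List Char) (heq : ¬ S.length = t.length)
    (hlt : S.length < t.length) :
    solGenA S t =
      (if t.getLast? = some 'A' then solGenA S (t.take (t.length - 1)) else [])
        ++ (if t.head? = some 'B' then solGenA S ((t.drop 1).reverse) else [])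
        ++ [0] := by
  rw [solGenA]; simp [heq, hlt]

theorem loopB_flat (S : List Char) :
    ∀ (n : Nat) (st : List (Option (List Char))), pvStackM st ≤ n →
      loopB S st = st.flatMap (pvEmit S) := by
  intro n
  induction n with
  | zero =>
    intro st h
    cases st with
    | nil => simp [loopB]
    | cons x rest =>
      exfalso
      have := pvWeight_pos x
      simp [pvStackM] at h; omega
  | succ n ih =>
    intro st h
    match st with
    | [] => simp [loopB]
    | none :: rest =>
      have hm : pvStackM rest ≤ n := by simp [pvStackM, pvWeight] at h ⊢; omega
      rw [loopB, ih rest hm]; simp [pvEmit]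
    | some t :: rest =>
      by_cases heq : S.length = t.length
      · have hm : pvStackM rest ≤ n := by
          have := pvWeight_pos (some t)
          simp [pvStackM] at h ⊢; omega
        rw [loopB, ih rest hm]
        simp [heq, pvEmit, solGenA_eq_len S t heq]
      · by_cases hlt : S.length < t.length
        · have h3 : 1 ≤ 3 ^ (t.length - 1) := Nat.one_le_pow _ _ (by norm_num)
          have hpow := pvPowSplit t.length (by omega)
          have htake : (t.take (t.length - 1)).length = t.length - 1 := by
            simp [List.length_take]
          have hdrop : ((t.drop 1).reverse).length = t.length - 1 := by simp
          set st' := ((if t.getLast? = some 'A' then [some (t.take (t.length - 1))] else [])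
            ++ (if t.head? = some 'B' then [some ((t.drop 1).reverse)] else [])
            ++ none :: rest) with hst'
          have hm : pvStackM st' ≤ n := by
            have hb : pvStackM st' < pvStackM (some t :: rest) := by
              simp only [hst', pvStackM, List.map_append, List.sum_append, List.map_cons,
                List.sum_cons]
              split_ifs <;> simp [pvWeight, htake] <;> omega
            simp [pvStackM] at h hb ⊢; omega
          rw [loopB]
          simp only [if_neg heq, dif_pos hlt]
          rw [ih st' hm]
          simp only [hst', List.flatMap_append, List.flatMap_cons]
          rw [show pvEmit S (some t) = solGenA S t from rfl,
            solGenA_expand S t heq hlt]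
          split_ifs <;> simp [pvEmit]
        · have hm : pvStackM rest ≤ n := by
            have := pvWeight_pos (some t)
            simp [pvStackM] at h ⊢; omega
          rw [loopB]
          simp only [if_neg heq, dif_neg hlt]
          rw [ih rest hm, List.flatMap_cons]
          rw [show pvEmit S (some t) = solGenA S t from rfl, solGenA_gt S t heq hlt]
          simp

-- ===== VERDICT (by name: the statement is the Claim_ definition above) =====
theorem solution_spec : Claim_equal_solution := by
  intro S T _
  unfold Spec_solution solution solution_alt
  rw [loopB_flat S.toList (pvStackM [some T.toList]) [some T.toList] le_rfl]
  simp [pvEmit]
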